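-- pv_equiv track=rewrite | github.com/macie-k/advent_of_code_2022 | day_6.py | find_n_distinct
-- ===== SOURCE A (Python) =====
-- def find_n_distinct(data, n):
--     result = n
--     buffer = [*data[slice(n)]]  # unpack string to an array of n chars
--
--     buffer_set = set(buffer)
--     if len(buffer_set) == len(buffer):
--         return result
--
--     for char in data[n:]:
--         result += 1
--         buffer.pop(0)
--         buffer.append(char)
--
--         buffer_set = set(buffer)    # create set to remove duplicates
--         if len(buffer_set) == len(buffer):
--             break
--
--     return result
-- ===== SOURCE B (Python) =====
-- def find_n_distinct(data, n):
--     # O(m) sliding window: a char-count dict plus a running number of duplicated chars.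
--     counts = {}
--     dups = 0
--     for c in data[:n]:
--         cnt = counts.get(c, 0) + 1
--         counts[c] = cnt
--         if cnt == 2:
--             dups += 1
--     if dups == 0:
--         return n
--     result = n
--     for out, new in zip(data, data[n:]):
--         result += 1
--         cnt = counts.get(out, 0) - 1
--         counts[out] = cnt
--         if cnt == 1:
--             dups -= 1
--         cnt = counts.get(new, 0) + 1
--         counts[new] = cnt
--         if cnt == 2:
--             dups += 1
--         if dups == 0:
--             break
--     return result
-- ===== Notes on version B (the rewrite author's own statement) =====
-- stated objective: faster
-- what changed: Instead of rebuilding a set of the whole window at every step (O(n) per character), B slides the window with a char-count dict and a running count of duplicated characters, updated in O(1) per character.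
import Mathlib
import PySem

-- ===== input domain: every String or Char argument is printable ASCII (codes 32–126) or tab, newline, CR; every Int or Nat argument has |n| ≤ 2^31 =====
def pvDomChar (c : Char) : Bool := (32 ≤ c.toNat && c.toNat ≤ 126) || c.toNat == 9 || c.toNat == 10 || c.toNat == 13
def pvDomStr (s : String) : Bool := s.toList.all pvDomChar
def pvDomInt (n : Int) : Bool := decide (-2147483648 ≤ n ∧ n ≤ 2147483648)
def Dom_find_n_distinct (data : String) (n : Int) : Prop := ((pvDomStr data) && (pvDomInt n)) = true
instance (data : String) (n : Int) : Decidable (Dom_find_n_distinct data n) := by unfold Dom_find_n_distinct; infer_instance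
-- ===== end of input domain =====

-- B replaces A's per-step set-rebuild over the window with a sliding-window char-count dict and a running duplicate counter (one pass).


-- ===== PORT A =====
-- the 'for char in data[n:]' loop; state: remaining chars, buffer, result
def pvAloop : List Char → List Char → Int → Int
  | [], _, result => result
  | c :: rest, buffer, result =>
    let result := result + 1
    -- buffer.pop(0); buffer.append(char).  pop(0) cannot raise: an empty buffer
    -- passes the distinct check and returns before/at the end of each iteration.
    let buffer := buffer.tail ++ [c]
    if (PySem.Set.ofList buffer).length == buffer.length then result
    else pvAloop rest buffer result

def find_n_distinct (data : String) (n : Int) : Int :=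
  let result := n
  let buffer := PySem.List.slice data.toList none (some n)   -- [*data[slice(n)]]
  if (PySem.Set.ofList buffer).length == buffer.length then result
  else pvAloop (PySem.List.slice data.toList (some n) none) buffer result

-- ===== PORT B =====
-- B's first loop: build counts and dups over data[:n]
def pvBinit : List Char → PySem.Dict Char Int → Int → PySem.Dict Char Int × Int
  | [], counts, dups => (counts, dups)
  | c :: l, counts, dups =>
    let cnt := counts.getD c 0 + 1
    let counts := counts.insert c cnt
    let dups := if cnt == 2 then dups + 1 else dups
    pvBinit l counts dups

-- B's second loop: 'for out, new in zip(data, data[n:])' with break on dups == 0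
def pvBscan : List (Char × Char) → PySem.Dict Char Int → Int → Int → Int
  | [], _, _, result => result
  | (outc, newc) :: rest, counts, dups, result =>
    let result := result + 1
    let cnt := counts.getD outc 0 - 1
    let counts := counts.insert outc cnt
    let dups := if cnt == 1 then dups - 1 else dups
    let cnt2 := counts.getD newc 0 + 1
    let counts := counts.insert newc cnt2
    let dups := if cnt2 == 2 then dups + 1 else dups
    if dups == 0 then result else pvBscan rest counts dups result

def find_n_distinct_alt (data : String) (n : Int) : Int :=
  let cs := data.toList
  let st := pvBinit (PySem.List.slice cs none (some n)) PySem.Dict.empty 0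
  if st.2 == 0 then n
  else pvBscan (List.zip cs (PySem.List.slice cs (some n) none)) st.1 st.2 n

-- ===== PRECONDITION & SPEC =====
def Spec_find_n_distinct (data : String) (n : Int) (out : Int) : Prop := out = find_n_distinct_alt data n
instance (data : String) (n : Int) (out : Int) : Decidable (Spec_find_n_distinct data n out) := by unfold Spec_find_n_distinct; infer_instance

-- ===== CLAIM (what is proved, stated in full; the proofs are below) =====
def Claim_equal_find_n_distinct : Prop := ∀ (data : String) (n : Int), Dom_find_n_distinct data n → Spec_find_n_distinct data n (find_n_distinct data n)

-- ===== LEMMAS AND PROOFS =====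

-- number of distinct chars occurring at least twice in l (what B's 'dups' tracks)
def pvDup (l : List Char) : Int := ((l.toFinset.filter (fun c => 2 ≤ l.count c)).card : Int)

lemma pvDup_perm {l l' : List Char} (h : l.Perm l') : pvDup l = pvDup l' := by
  unfold pvDup
  rw [show l.toFinset = l'.toFinset from by ext x; simp [List.mem_toFinset, h.mem_iff]]
  rw [Finset.filter_congr (fun x _ => by rw [h.count_eq] :
    ∀ x ∈ l'.toFinset, 2 ≤ List.count x l ↔ 2 ≤ List.count x l')]

lemma pvDup_cons (c : Char) (l : List Char) :
    pvDup (c :: l) = pvDup l + (if l.count c = 1 then 1 else 0) := by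
  unfold pvDup
  by_cases h1 : l.count c = 1
  · have hc : c ∉ l.toFinset.filter (fun x => 2 ≤ l.count x) := by simp [h1]
    have hS : (c :: l).toFinset.filter (fun x => 2 ≤ (c :: l).count x)
        = insert c (l.toFinset.filter (fun x => 2 ≤ l.count x)) := by
      ext x
      simp only [Finset.mem_filter, List.mem_toFinset, List.mem_cons, Finset.mem_insert]
      by_cases hx : x = c
      · subst hx; rw [List.count_cons_self]; simp [h1]
      · rw [List.count_cons_of_ne (Ne.symm hx)]; simp [hx]
    rw [hS, Finset.card_insert_of_notMem hc]
    simp [h1]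
  · have hS : (c :: l).toFinset.filter (fun x => 2 ≤ (c :: l).count x)
        = l.toFinset.filter (fun x => 2 ≤ l.count x) := by
      ext x
      simp only [Finset.mem_filter, List.mem_toFinset, List.mem_cons]
      by_cases hx : x = c
      · subst hx
        rw [List.count_cons_self]
        constructor
        · rintro ⟨_, h2⟩
          have hm : x ∈ l := by
            by_contra hm
            have h0 := List.count_eq_zero_of_not_mem hm
            omega
          exact ⟨hm, by omega⟩
        · rintro ⟨hm, h2⟩
          exact ⟨Or.inr hm, by omega⟩
      · rw [List.count_cons_of_ne (Ne.symm hx)]; simp [hx]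
    rw [hS]
    simp [h1]

lemma pvDup_append_singleton (c : Char) (l : List Char) :
    pvDup (l ++ [c]) = pvDup l + (if l.count c = 1 then 1 else 0) := by
  rw [pvDup_perm (List.perm_append_singleton c l), pvDup_cons]

lemma pvDup_eq_zero_iff (l : List Char) : pvDup l = 0 ↔ l.Nodup := by
  unfold pvDup
  rw [Nat.cast_eq_zero, Finset.card_eq_zero, Finset.filter_eq_empty_iff]
  constructor
  · intro h
    rw [List.nodup_iff_count_le_one]
    intro a
    by_cases hm : a ∈ l
    · have := h (List.mem_toFinset.mpr hm); omega
    · simp [List.count_eq_zero_of_not_mem hm]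
  · intro h x hx
    have := List.nodup_iff_count_le_one.mp h x
    omega

lemma setlen_eq_iff (l : List Char) :
    ((PySem.Set.ofList l).length == l.length) = true ↔ l.Nodup := by
  rw [beq_iff_eq]
  constructor
  · intro h
    have hfs : (PySem.Set.ofList l).toFinset = l.toFinset := by
      ext x; simp [List.mem_toFinset, PySem.Set.mem_ofList]
    have h1 : l.toFinset.card = l.length := by
      rw [← hfs, List.toFinset_card_of_nodup (PySem.Set.nodup_ofList l), h]
    have h2 : l.dedup.length = l.length := by rw [← List.card_toFinset l, h1]
    have h3 : l.dedup = l := (List.dedup_sublist l).eq_of_length h2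
    rw [← h3]; exact l.nodup_dedup
  · intro h; rw [PySem.Set.ofList_eq_self_of_nodup l h]

-- the two distinctness tests compute the same boolean
lemma cond_eq (l : List Char) (dups : Int) (hd : dups = pvDup l) :
    ((PySem.Set.ofList l).length == l.length) = (dups == 0) := by
  rw [Bool.eq_iff_iff, setlen_eq_iff, beq_iff_eq, hd, pvDup_eq_zero_iff]

lemma pvBinit_inv : ∀ (l p : List Char) (counts : PySem.Dict Char Int) (dups : Int),
    (∀ c, counts.getD c 0 = (p.count c : Int)) → dups = pvDup p →
    (∀ c, (pvBinit l counts dups).1.getD c 0 = ((p ++ l).count c : Int)) ∧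
      (pvBinit l counts dups).2 = pvDup (p ++ l) := by
  intro l
  induction l with
  | nil => intro p counts dups hc hd; simpa [pvBinit] using ⟨hc, hd⟩
  | cons c l ih =>
    intro p counts dups hc hd
    have hc' : ∀ x, (counts.insert c (counts.getD c 0 + 1)).getD x 0
        = ((p ++ [c]).count x : Int) := by
      intro x
      rw [PySem.Dict.getD_insert]
      by_cases hx : x = c
      · subst hx; simp [hc, List.count_append]
      · simp [hx, Ne.symm hx, hc, List.count_append]
    have hd' : (if (counts.getD c 0 + 1) == 2 then dups + 1 else dups) = pvDup (p ++ [c]) := by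
      rw [pvDup_append_singleton, hc c, hd]
      by_cases h1 : p.count c = 1
      · simp [h1]
      · have hb : ¬ (((p.count c : Int) + 1 == 2) = true) := by
          simp only [beq_iff_eq]
          omega
        rw [if_neg hb, if_neg h1]
        ring
    have := ih (p ++ [c]) _ _ hc' hd'
    simpa [pvBinit] using this

lemma pvloop_eq : ∀ (rest buffer : List Char) (counts : PySem.Dict Char Int) (dups result : Int),
    buffer ≠ [] →
    (∀ c, counts.getD c 0 = (buffer.count c : Int)) → dups = pvDup buffer →
    pvAloop rest buffer result = pvBscan (List.zip (buffer ++ rest) rest) counts dups result := by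
  intro rest
  induction rest with
  | nil =>
    intro buffer counts dups result hne hc hd
    simp [pvAloop, pvBscan, List.zip_nil_right]
  | cons c rest ih =>
    intro buffer counts dups result hne hc hd
    obtain ⟨b0, bt, rfl⟩ := List.exists_cons_of_ne_nil hne
    have hzip : List.zip ((b0 :: bt) ++ c :: rest) (c :: rest)
        = (b0, c) :: List.zip (bt ++ (c :: rest)) rest := by
      simp [List.cons_append]
    rw [hzip]
    simp only [pvAloop, pvBscan, List.tail_cons]
    have hcnt : counts.getD b0 0 - 1 = (bt.count b0 : Int) := by
      rw [hc b0, List.count_cons_self]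
      push_cast
      ring
    have hc1 : ∀ x, (counts.insert b0 (counts.getD b0 0 - 1)).getD x 0 = (bt.count x : Int) := by
      intro x
      rw [PySem.Dict.getD_insert]
      by_cases hx : x = b0
      · subst hx; simp [hcnt]
      · rw [if_neg hx, hc x, List.count_cons_of_ne (Ne.symm hx)]
    have hd1 : (if (counts.getD b0 0 - 1) == 1 then dups - 1 else dups) = pvDup bt := by
      rw [hcnt, hd, pvDup_cons]
      by_cases h1 : bt.count b0 = 1
      · simp [h1]
      · have hb : ¬ (((bt.count b0 : Int) == 1) = true) := by
          simp only [beq_iff_eq]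
          omega
        rw [if_neg hb, if_neg h1]
        ring
    have hc2 : ∀ x, ((counts.insert b0 (counts.getD b0 0 - 1)).insert c
        ((counts.insert b0 (counts.getD b0 0 - 1)).getD c 0 + 1)).getD x 0
        = ((bt ++ [c]).count x : Int) := by
      intro x
      rw [PySem.Dict.getD_insert]
      by_cases hx : x = c
      · subst hx
        rw [if_pos rfl, hc1 x, List.count_append]
        simp
      · rw [if_neg hx, hc1 x, List.count_append]
        have h0 : List.count x [c] = 0 := by
          simp [Ne.symm hx]
        rw [h0]
        simp
    have hcnt2 : (counts.insert b0 (counts.getD b0 0 - 1)).getD c 0 + 1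
        = ((bt ++ [c]).count c : Int) := by
      rw [hc1 c, List.count_append]
      simp
    have hd2 : (if ((counts.insert b0 (counts.getD b0 0 - 1)).getD c 0 + 1) == 2
          then (if (counts.getD b0 0 - 1) == 1 then dups - 1 else dups) + 1
          else (if (counts.getD b0 0 - 1) == 1 then dups - 1 else dups))
        = pvDup (bt ++ [c]) := by
      rw [hd1, hc1 c, pvDup_append_singleton]
      by_cases h1 : bt.count c = 1
      · simp [h1]
      · have hb : ¬ ((((bt.count c : Int)) + 1 == 2) = true) := by
          simp only [beq_iff_eq]
          omega
        rw [if_neg hb, if_neg h1]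
        ring
    rw [cond_eq (bt ++ [c]) _ hd2]
    by_cases hstop : ((if ((counts.insert b0 (counts.getD b0 0 - 1)).getD c 0 + 1) == 2
          then (if (counts.getD b0 0 - 1) == 1 then dups - 1 else dups) + 1
          else (if (counts.getD b0 0 - 1) == 1 then dups - 1 else dups)) == 0) = true
    · rw [if_pos hstop, if_pos hstop]
    · rw [if_neg hstop, if_neg hstop]
      have happ : (bt ++ [c]) ++ rest = bt ++ (c :: rest) := by
        rw [List.append_assoc]
        rfl
      have := ih (bt ++ [c]) _ _ (result + 1) (by simp) hc2 hd2
      rw [happ] at this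
      exact this

lemma slice_split (xs : List Char) (n : Int) :
    PySem.List.slice xs none (some n) ++ PySem.List.slice xs (some n) none = xs := by
  rw [show PySem.List.slice xs none (some n) = xs.take (PySem.List.clampIdx xs.length n) from by
        simp [PySem.List.slice],
      PySem.List.slice_some_none, List.take_append_drop]

-- ===== VERDICT (by name: the statement is the Claim_ definition above) =====
theorem find_n_distinct_spec : Claim_equal_find_n_distinct := by
  intro data n _
  unfold Spec_find_n_distinct
  simp only [find_n_distinct, find_n_distinct_alt]
  obtain ⟨hC, hD⟩ := pvBinit_inv (PySem.List.slice data.toList none (some n)) []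
      PySem.Dict.empty 0 (by intro c; simp [PySem.Dict.getD_empty]) (by unfold pvDup; simp)
  simp only [List.nil_append] at hC hD
  rw [cond_eq _ _ hD]
  by_cases h : ((pvBinit (PySem.List.slice data.toList none (some n))
      PySem.Dict.empty 0).2 == 0) = true
  · rw [if_pos h, if_pos h]
  · have hnd : ¬ (PySem.List.slice data.toList none (some n)).Nodup := by
      intro hnd
      exact h (beq_iff_eq.mpr (by rw [hD]; exact (pvDup_eq_zero_iff _).mpr hnd))
    have hne : PySem.List.slice data.toList none (some n) ≠ [] := by
      intro hnil
      exact hnd (hnil ▸ List.nodup_nil)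
    rw [if_neg h, if_neg h]
    have := pvloop_eq (PySem.List.slice data.toList (some n) none)
      (PySem.List.slice data.toList none (some n)) _ _ n hne hC hD
    rw [slice_split data.toList n] at this
    exact this
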